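-- pv_equiv track=rewrite | github.com/daniel-reich/ubiquitous-fiesta | K6oxe3bvPqaQWxkFw_17.py | join_digits
-- ===== SOURCE A (Python) =====
-- def join_digits(n):
--   y = ""
--   for x in range(1, n + 1):
--     if x < 10:
--       y += str(x) + "-"
--     else:
--       for z in str(x):
--         y += z + "-"
--   return y.rstrip("-")
-- ===== SOURCE B (Python) =====
-- def join_digits(n):
--     s = ''.join(map(str, range(1, n + 1)))
--     return '-'.join(s)
-- ===== Notes on version B (the rewrite author's own statement) =====
-- stated objective: simpler
-- what changed: B replaces A's interleaved append-digit-then-dash loop with rstrip cleanup by a build-then-join decomposition: flatten 1..n into one digit string, then '-'.join it.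
import Mathlib
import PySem

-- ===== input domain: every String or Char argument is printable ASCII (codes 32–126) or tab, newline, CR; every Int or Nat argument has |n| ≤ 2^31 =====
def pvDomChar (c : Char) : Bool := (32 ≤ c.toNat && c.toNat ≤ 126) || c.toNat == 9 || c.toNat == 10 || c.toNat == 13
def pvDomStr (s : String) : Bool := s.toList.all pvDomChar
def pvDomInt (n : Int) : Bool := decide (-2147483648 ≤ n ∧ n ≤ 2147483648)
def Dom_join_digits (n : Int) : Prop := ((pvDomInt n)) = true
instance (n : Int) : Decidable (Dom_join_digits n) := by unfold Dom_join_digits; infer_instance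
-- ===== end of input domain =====

-- B changes A's interleaved append-digit-then-dash loop (with trailing-dash rstrip) into a
-- build-then-join decomposition: flatten 1..n into one digit string, then '-'.join it. Objective: simpler.

-- ===== PORT A =====
-- y.rstrip("-") ported by hand (no PySem rstrip-with-chars primitive): drop trailing '-' chars; exact.
def pyRstripDash (cs : List Char) : List Char := (cs.reverse.dropWhile (· == '-')).reverse

def join_digits (n : Int) : String :=
  let y : List Char :=
    (PySem.List.pyRange 1 (n + 1) 1).foldl
      (fun y x =>
        if x < 10 then y ++ PySem.Int.toChars x ++ ['-']
        else (PySem.Int.toChars x).foldl (fun y z => y ++ [z] ++ ['-']) y)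
      []
  String.ofList (pyRstripDash y)

-- ===== PORT B =====
def join_digits_alt (n : Int) : String :=
  let s : List Char := ((PySem.List.pyRange 1 (n + 1) 1).map PySem.Int.toChars).flatten
  String.ofList (PySem.Chars.join ['-'] (s.map (fun c => [c])))

-- ===== PRECONDITION & SPEC =====
def Spec_join_digits (n : Int) (out : String) : Prop := out = join_digits_alt n
instance (n : Int) (out : String) : Decidable (Spec_join_digits n out) := by unfold Spec_join_digits; infer_instance

-- ===== CLAIM (what is proved, stated in full; the proofs are below) =====
def Claim_equal_join_digits : Prop := ∀ (n : Int), Dom_join_digits n → Spec_join_digits n (join_digits n)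

-- ===== LEMMAS AND PROOFS =====

-- the inner char loop of A appends digit-dash pairs
theorem foldl_dash (cs : List Char) (y : List Char) :
    cs.foldl (fun y z => y ++ [z] ++ ['-']) y = y ++ cs.flatMap (fun c => [c, '-']) := by
  induction cs generalizing y with
  | nil => simp
  | cons c rest ih => simp [List.flatMap]

-- both branches of A's loop body do the same thing for x ≥ 1
theorem stepA_eq (x : Int) (hx : 1 ≤ x) (y : List Char) :
    (if x < 10 then y ++ PySem.Int.toChars x ++ ['-']
     else (PySem.Int.toChars x).foldl (fun y z => y ++ [z] ++ ['-']) y)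
      = y ++ (PySem.Int.toChars x).flatMap (fun c => [c, '-']) := by
  by_cases h : x < 10
  · have h10 : x.toNat < 10 := by omega
    simp only [if_pos h, PySem.Int.toChars, if_neg (by omega : ¬ x < 0),
      Nat.toDigits_of_lt_base h10]
    simp
  · rw [if_neg h, foldl_dash]

-- A's whole loop, with accumulator generalized
theorem foldA_eq (r : List Int) (hr : ∀ x ∈ r, 1 ≤ x) (y : List Char) :
    r.foldl
      (fun y x =>
        if x < 10 then y ++ PySem.Int.toChars x ++ ['-']
        else (PySem.Int.toChars x).foldl (fun y z => y ++ [z] ++ ['-']) y) y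
      = y ++ ((r.map PySem.Int.toChars).flatten).flatMap (fun c => [c, '-']) := by
  induction r generalizing y with
  | nil => simp
  | cons x rest ih =>
    simp only [List.foldl_cons, List.map_cons, List.flatten_cons, List.flatMap_append]
    rw [stepA_eq x (hr x (by simp)) y, ih (fun z hz => hr z (by simp [hz]))]
    simp

-- chars produced by str(x) for x ≥ 1 are digits, hence never '-'
theorem toChars_no_dash (x : Int) (hx : 1 ≤ x) : ∀ c ∈ PySem.Int.toChars x, c ≠ '-' := by
  intro c hc
  simp only [PySem.Int.toChars, if_neg (by omega : ¬ x < 0)] at hc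
  have hd := Nat.isDigit_of_mem_toDigits (by norm_num) (by norm_num) hc
  intro h
  subst h
  simp [Char.isDigit] at hd

theorem rstripDash_append (xs ys : List Char) (c : Char) (hc : c ∈ ys) (hne : c ≠ '-') :
    pyRstripDash (xs ++ ys) = xs ++ pyRstripDash ys := by
  unfold pyRstripDash
  rw [List.reverse_append, List.dropWhile_append]
  have hne' : ¬ (ys.reverse.dropWhile (· == '-')).isEmpty = true := by
    intro h
    rw [List.isEmpty_iff, List.dropWhile_eq_nil_iff] at h
    have := h c (by simpa using hc)
    simp at this
    exact hne this
  rw [if_neg hne']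
  simp

-- the core string identity: strip the trailing dash of a digit-dash interleaving = '-'.join
theorem rstrip_flatMap_eq_join (s : List Char) (hs : ∀ c ∈ s, c ≠ '-') :
    pyRstripDash (s.flatMap (fun c => [c, '-']))
      = PySem.Chars.join ['-'] (s.map (fun c => [c])) := by
  induction s with
  | nil => decide
  | cons c rest ih =>
    cases rest with
    | nil =>
      have hc : c ≠ '-' := hs c (by simp)
      simp only [List.flatMap_cons, List.flatMap_nil, List.append_nil, List.map_cons,
        List.map_nil, PySem.Chars.join_singleton]
      unfold pyRstripDash
      simp [hc]
    | cons d t =>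
      have hd : d ≠ '-' := hs d (by simp)
      have hrest : ∀ a ∈ d :: t, a ≠ '-' := fun a ha => hs a (by simp [ha])
      have : (c :: d :: t).flatMap (fun c => [c, '-'])
          = [c, '-'] ++ (d :: t).flatMap (fun c => [c, '-']) := by simp
      rw [this, rstripDash_append _ _ d (by simp) hd, ih hrest]
      rw [show List.map (fun c => [c]) (c :: d :: t) = [c] :: [d] :: List.map (fun c => [c]) t from rfl,
        PySem.Chars.join_cons_cons]
      simp

-- ===== VERDICT (by name: the statement is the Claim_ definition above) =====
theorem join_digits_spec : Claim_equal_join_digits := by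
  intro n _
  unfold Spec_join_digits
  simp only [join_digits, join_digits_alt]
  have hr : ∀ x ∈ PySem.List.pyRange 1 (n + 1) 1, 1 ≤ x := by
    intro x hx
    exact (PySem.List.mem_pyRange_one.mp hx).1
  rw [foldA_eq _ hr, List.nil_append, rstrip_flatMap_eq_join]
  intro c hc
  rcases List.mem_flatten.mp hc with ⟨cs, hcs, hcmem⟩
  rcases List.mem_map.mp hcs with ⟨x, hx, rfl⟩
  exact toChars_no_dash x (hr x hx) c hcmem
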